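-- pv_equiv track=rewrite | github.com/semeniuta/aoc2022 | day_06/startofpacket.py | find_n_chars_until_unique_line
-- ===== SOURCE A (Python) =====
-- def find_n_chars_until_unique_line(buf, line_len):
--
--     start = 0
--     end = len(buf) - line_len + 1
--
--     for i in range(start, end):
--         marker_candidate = buf[i:i+line_len]
--         char_set = set(marker_candidate)
--         if len(char_set) == line_len:
--             return i + line_len
--
--     return -1
-- ===== SOURCE B (Python) =====
-- def find_n_chars_until_unique_line(buf, line_len):
--     # O(n) sliding window: track the last occurrence of each char and the
--     # left edge of the longest duplicate-free window ending at the current char.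
--     if line_len < 0:
--         return -1
--     if line_len == 0:
--         return 0
--     last = {}
--     left = 0
--     for j, ch in enumerate(buf):
--         prev = last.get(ch)
--         if prev is not None and prev >= left:
--             left = prev + 1
--         last[ch] = j
--         if j + 1 - left >= line_len:
--             return j + 1
--     return -1
-- ===== Notes on version B (the rewrite author's own statement) =====
-- stated objective: faster
-- what changed: A re-slices each candidate window and builds a fresh set per index; B makes a single pass with a last-occurrence map and a sliding left edge of the current duplicate-free window, returning the same first index.
import Mathlib
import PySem

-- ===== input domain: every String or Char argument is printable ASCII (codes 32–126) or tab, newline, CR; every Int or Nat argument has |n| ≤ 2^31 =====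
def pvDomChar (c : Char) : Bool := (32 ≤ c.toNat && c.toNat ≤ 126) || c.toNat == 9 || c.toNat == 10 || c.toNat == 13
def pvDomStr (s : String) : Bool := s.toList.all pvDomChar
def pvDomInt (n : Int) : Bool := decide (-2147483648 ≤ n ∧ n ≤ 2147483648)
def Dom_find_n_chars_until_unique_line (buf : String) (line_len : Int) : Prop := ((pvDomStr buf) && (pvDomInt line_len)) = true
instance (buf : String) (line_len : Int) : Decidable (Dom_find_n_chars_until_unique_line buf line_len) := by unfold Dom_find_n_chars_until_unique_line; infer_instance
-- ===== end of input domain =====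

-- B replaces A's per-window distinctness scan (O(n·line_len)) by a one-pass sliding
-- window tracking each character's last occurrence (O(n)); same return value everywhere.

-- ===== PORT A =====
def pvALoop (cs : List Char) (L : Int) : List Int → Int
  | [] => -1
  | i :: rest =>
    let marker_candidate := PySem.List.slice cs (some i) (some (i + L))
    let char_set := PySem.Set.ofList marker_candidate
    if PySem.Set.len char_set = L then i + L else pvALoop cs L rest

def find_n_chars_until_unique_line (buf : String) (line_len : Int) : Int :=
  let start : Int := 0
  let stop : Int := PySem.Str.len buf - line_len + 1
  pvALoop buf.toList line_len (PySem.List.pyRange start stop 1)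

-- ===== PORT B =====
def pvBLoop (L : Int) : List (Int × Char) → PySem.Dict Char Int → Int → Int
  | [], _, _ => -1
  | (j, ch) :: rest, last, left =>
    let left' : Int :=
      match PySem.Dict.get? last ch with
      | some prev => if left ≤ prev then prev + 1 else left
      | none => left
    let last' := PySem.Dict.insert last ch j
    if L ≤ j + 1 - left' then j + 1 else pvBLoop L rest last' left'

def find_n_chars_until_unique_line_alt (buf : String) (line_len : Int) : Int :=
  if line_len < 0 then -1
  else if line_len = 0 then 0
  else pvBLoop line_len (PySem.List.enumerate buf.toList 0) PySem.Dict.empty 0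

-- ===== PRECONDITION & SPEC =====
def Spec_find_n_chars_until_unique_line (buf : String) (line_len : Int) (out : Int) : Prop := out = find_n_chars_until_unique_line_alt buf line_len
instance (buf : String) (line_len : Int) (out : Int) : Decidable (Spec_find_n_chars_until_unique_line buf line_len out) := by unfold Spec_find_n_chars_until_unique_line; infer_instance

-- ===== CLAIM (what is proved, stated in full; the proofs are below) =====
def Claim_equal_find_n_chars_until_unique_line : Prop := ∀ (buf : String) (line_len : Int), Dom_find_n_chars_until_unique_line buf line_len → Spec_find_n_chars_until_unique_line buf line_len (find_n_chars_until_unique_line buf line_len)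

-- ===== LEMMAS AND PROOFS =====

-- `pvGood cs Ln j` : the length-`Ln` window of `cs` ending at index `j` exists and is duplicate-free.
def pvGood (cs : List Char) (Ln : Nat) (j : Nat) : Bool :=
  decide (Ln ≤ j + 1 ∧ ((cs.take (j+1)).drop (j + 1 - Ln)).Nodup)

def pvPredA (cs : List Char) (L : Int) (i : Int) : Bool :=
  decide (PySem.Set.len (PySem.Set.ofList (PySem.List.slice cs (some i) (some (i + L)))) = L)

-- `last` maps each char to its last occurrence before position m (none if absent there)
def pvLastInv (cs : List Char) (m : Nat) (last : PySem.Dict Char Int) : Prop :=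
  ∀ c : Char,
    (∀ v : Int, PySem.Dict.get? last c = some v →
      ∃ k : Nat, v = (k : Int) ∧ k < m ∧ cs[k]? = some c ∧
        ∀ k', k < k' → k' < m → cs[k']? ≠ some c) ∧
    (PySem.Dict.get? last c = none → ∀ k, k < m → cs[k]? ≠ some c)

-- `lf` is the least start of a duplicate-free suffix window of the first m chars
def pvLeftInv (cs : List Char) (m : Nat) (lf : Nat) : Prop :=
  lf ≤ m ∧ ((cs.take m).drop lf).Nodup ∧ ∀ s, s < lf → ¬ ((cs.take m).drop s).Nodup

lemma pvSetLen {α : Type} (s : PySem.Set α) : PySem.Set.len s = (List.length s : Int) := by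
  simp [PySem.Set.len]

lemma pvFindCongr {α : Type} (p q : α → Bool) (l : List α) (h : ∀ x ∈ l, p x = q x) :
    l.find? p = l.find? q := by
  induction l with
  | nil => rfl
  | cons x t ih =>
    simp only [List.find?_cons, h x (by simp)]
    cases q x <;> simp_all

lemma pvNodupMono (p : List Char) {a b : Nat} (hab : a ≤ b) (h : (p.drop a).Nodup) :
    (p.drop b).Nodup := by
  have e : p.drop b = (p.drop a).drop (b - a) := by
    rw [List.drop_drop]; congr 1; omega
  rw [e]; exact h.sublist (List.drop_sublist _ _)

lemma pvNodupConcat (l : List Char) (c : Char) : (l ++ [c]).Nodup ↔ l.Nodup ∧ c ∉ l := by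
  rw [← List.concat_eq_append, List.nodup_concat]; tauto

lemma pvMemDropTake (cs : List Char) (m s : Nat) (c : Char) :
    c ∈ (cs.take m).drop s ↔ ∃ k, s ≤ k ∧ k < m ∧ cs[k]? = some c := by
  rw [List.mem_iff_getElem?]
  constructor
  · rintro ⟨t, ht⟩
    rw [List.getElem?_drop, List.getElem?_take] at ht
    split_ifs at ht with h
    exact ⟨s + t, by omega, h, ht⟩
  · rintro ⟨k, hk1, hk2, hk3⟩
    refine ⟨k - s, ?_⟩
    rw [List.getElem?_drop, List.getElem?_take, if_pos (by omega), show s + (k - s) = k by omega]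
    exact hk3

lemma pvSetLenEq (w : List Char) : (PySem.Set.ofList w : List Char).length = w.length ↔ w.Nodup := by
  constructor
  · intro h
    have hperm : (PySem.Set.ofList w : List Char).Perm w.dedup := by
      rw [List.perm_ext_iff_of_nodup (PySem.Set.nodup_ofList w) (List.nodup_dedup w)]
      intro a; rw [PySem.Set.mem_ofList, List.mem_dedup]
    have hlen : w.dedup.length = w.length := by rw [← hperm.length_eq, h]
    rw [← List.dedup_eq_self]
    exact (List.dedup_sublist w).eq_of_length hlen
  · intro h; rw [PySem.Set.ofList_eq_self_of_nodup w h]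

lemma pvTakeSucc (cs : List Char) {m : Nat} {ch : Char} (h : cs[m]? = some ch) :
    cs.take (m+1) = cs.take m ++ [ch] := by
  rw [List.take_add_one, h]; rfl

lemma pvDropTakeSucc (cs : List Char) {m s : Nat} {ch : Char} (hs : s ≤ m) (hm : m ≤ cs.length)
    (h : cs[m]? = some ch) :
    (cs.take (m+1)).drop s = (cs.take m).drop s ++ [ch] := by
  rw [pvTakeSucc cs h, List.drop_append_of_le_length (by simp [List.length_take]; omega)]

lemma pvLastStep (cs : List Char) (m : Nat) (ch : Char) (hch : cs[m]? = some ch)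
    (last : PySem.Dict Char Int) (hlast : pvLastInv cs m last) :
    pvLastInv cs (m+1) (PySem.Dict.insert last ch (m : Int)) := by
  intro c
  constructor
  · intro v hv
    rw [PySem.Dict.get?_insert] at hv
    by_cases hc : c = ch
    · rw [if_pos hc] at hv
      obtain rfl : (m : Int) = v := by injection hv
      exact ⟨m, rfl, by omega, hc ▸ hch, fun k' h1 h2 => by omega⟩
    · rw [if_neg hc] at hv
      obtain ⟨k, h1, h2, h3, h4⟩ := (hlast c).1 v hv
      refine ⟨k, h1, by omega, h3, fun k' hk1 hk2 => ?_⟩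
      rcases Nat.lt_or_ge k' m with h | h
      · exact h4 k' hk1 h
      · have : k' = m := by omega
        subst this
        rw [hch]
        intro he
        exact hc (by injection he; simp_all)
  · intro hv k hk
    rw [PySem.Dict.get?_insert] at hv
    by_cases hc : c = ch
    · rw [if_pos hc] at hv; cases hv
    · rw [if_neg hc] at hv
      rcases Nat.lt_or_ge k m with h | h
      · exact (hlast c).2 hv k h
      · have : k = m := by omega
        subst this
        rw [hch]
        intro he
        exact hc (by injection he; simp_all)

lemma pvStep (cs : List Char) (m : Nat) (ch : Char) (hm : m < cs.length) (hch : cs[m]? = some ch)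
    (last : PySem.Dict Char Int) (lf : Nat) (hlast : pvLastInv cs m last)
    (hleft : pvLeftInv cs m lf) :
    ∃ lf' : Nat,
      (match PySem.Dict.get? last ch with
       | some prev => if (lf : Int) ≤ prev then prev + 1 else (lf : Int)
       | none => (lf : Int)) = (lf' : Int)
      ∧ pvLeftInv cs (m+1) lf' := by
  obtain ⟨hlf_le, hnd, hmin⟩ := hleft
  have hmlen : m ≤ cs.length := le_of_lt hm
  -- extension of an already-duplicated window stays duplicated
  have hext : ∀ s : Nat, s < lf → ¬ ((cs.take (m+1)).drop s).Nodup := by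
    intro s hs
    rw [pvDropTakeSucc cs (by omega) hmlen hch, pvNodupConcat]
    rintro ⟨h1, _⟩
    exact hmin s hs h1
  cases hg : PySem.Dict.get? last ch with
  | none =>
    refine ⟨lf, rfl, by omega, ?_, hext⟩
    have hnotin : ch ∉ (cs.take m).drop lf := by
      rw [pvMemDropTake]
      rintro ⟨k, hk1, hk2, hk3⟩
      exact (hlast ch).2 hg k hk2 hk3
    rw [pvDropTakeSucc cs hlf_le hmlen hch, pvNodupConcat]
    exact ⟨hnd, hnotin⟩
  | some prev =>
    obtain ⟨k, hkv, hkm, hkc, hknol⟩ := (hlast ch).1 prev hg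
    subst hkv
    by_cases hcmp : (lf : Int) ≤ (k : Int)
    · refine ⟨k + 1, by show (if (lf : Int) ≤ (k : Int) then (k : Int) + 1 else (lf : Int)) = ((k + 1 : Nat) : Int); rw [if_pos hcmp]; push_cast; ring, by omega, ?_, ?_⟩
      · -- nodup at k+1
        have hnotin : ch ∉ (cs.take m).drop (k+1) := by
          rw [pvMemDropTake]
          rintro ⟨k'', h1, h2, h3⟩
          exact hknol k'' (by omega) h2 h3
        rw [pvDropTakeSucc cs (by omega) hmlen hch, pvNodupConcat]
        exact ⟨pvNodupMono _ (a := lf) (by omega) hnd, hnotin⟩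
      · -- minimality below k+1
        intro s hs
        rw [pvDropTakeSucc cs (by omega) hmlen hch, pvNodupConcat]
        rintro ⟨h1, h2⟩
        rcases Nat.lt_or_ge s lf with hslf | hslf
        · exact hmin s hslf h1
        · exact h2 ((pvMemDropTake cs m s ch).mpr ⟨k, by omega, hkm, hkc⟩)
    · refine ⟨lf, by show (if (lf : Int) ≤ (k : Int) then (k : Int) + 1 else (lf : Int)) = ((lf : Nat) : Int); rw [if_neg hcmp], by omega, ?_, hext⟩
      have hnotin : ch ∉ (cs.take m).drop lf := by
        rw [pvMemDropTake]
        rintro ⟨k'', h1, h2, h3⟩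
        exact hknol k'' (by omega) h2 h3
      rw [pvDropTakeSucc cs hlf_le hmlen hch, pvNodupConcat]
      exact ⟨hnd, hnotin⟩

lemma pvCond (cs : List Char) (L : Int) (hL : 1 ≤ L) (m : Nat) (lf' : Nat)
    (hleft' : pvLeftInv cs (m+1) lf') :
    (L ≤ (m : Int) + 1 - (lf' : Int)) ↔ pvGood cs L.toNat m = true := by
  obtain ⟨hle, hnd, hmin⟩ := hleft'
  have hLn : ((L.toNat : Nat) : Int) = L := Int.toNat_of_nonneg (by omega)
  rw [pvGood, decide_eq_true_eq]
  constructor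
  · intro h
    exact ⟨by omega, pvNodupMono _ (a := lf') (by omega) hnd⟩
  · rintro ⟨h1, h2⟩
    by_contra hc
    exact hmin (m + 1 - L.toNat) (by omega) h2

lemma pvBLoop_spec (cs : List Char) (L : Int) (hL : 1 ≤ L) :
    ∀ (rest : List Char) (m : Nat) (last : PySem.Dict Char Int) (lf : Nat),
      rest = cs.drop m → m ≤ cs.length →
      pvLastInv cs m last → pvLeftInv cs m lf →
      pvBLoop L (PySem.List.enumerate rest (m : Int)) last (lf : Int) =
        (match (List.range' m (cs.length - m)).find? (pvGood cs L.toNat) with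
         | some j => (j : Int) + 1 | none => -1) := by
  intro rest
  induction rest with
  | nil =>
    intro m last lf hrest hm _ _
    have hlen : cs.length - m = 0 := by
      have := congrArg List.length hrest
      simp [List.length_drop] at this
      omega
    simp [hlen, pvBLoop, PySem.List.enumerate]
  | cons ch rest' ih =>
    intro m last lf hrest hm hlast hleft
    have hm' : m < cs.length := by
      have := congrArg List.length hrest
      simp [List.length_drop] at this
      omega
    have hch : cs[m]? = some ch := by
      have h0 : (cs.drop m)[0]? = some ch := by rw [← hrest]; rfl
      rw [List.getElem?_drop] at h0
      simpa using h0
    have hrest' : rest' = cs.drop (m+1) := by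
      have : cs.drop (m + 1) = (cs.drop m).drop 1 := by rw [List.drop_drop]
      rw [this, ← hrest]
      rfl
    obtain ⟨lf', heq, hleft'⟩ := pvStep cs m ch hm' hch last lf hlast hleft
    have hlast' := pvLastStep cs m ch hch last hlast
    rw [PySem.List.enumerate_cons]
    show (let left' : Int :=
      match PySem.Dict.get? last ch with
      | some prev => if (lf : Int) ≤ prev then prev + 1 else (lf : Int)
      | none => (lf : Int)
      let last' := PySem.Dict.insert last ch (m : Int)
      if L ≤ (m : Int) + 1 - left' then (m : Int) + 1 else pvBLoop L (PySem.List.enumerate rest' ((m : Int) + 1)) last' left') = _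
    rw [show ((m : Int) + 1) = ((m + 1 : Nat) : Int) by push_cast; ring]
    simp only [heq]
    have hrange : List.range' m (cs.length - m) = m :: List.range' (m+1) (cs.length - (m+1)) := by
      rw [show cs.length - m = (cs.length - (m+1)) + 1 by omega, List.range'_succ]
    rw [hrange]
    have hcond : (L ≤ ((m + 1 : Nat) : Int) - (lf' : Int)) ↔ pvGood cs L.toNat m = true := by
      rw [show ((m + 1 : Nat) : Int) = (m : Int) + 1 by push_cast; ring]
      exact pvCond cs L hL m lf' hleft'
    by_cases hgd : pvGood cs L.toNat m = true
    · rw [if_pos (hcond.mpr hgd)]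
      simp [hgd]
    · rw [if_neg (fun hc => hgd (hcond.mp hc))]
      rw [List.find?_cons_of_neg (by simpa using hgd)]
      exact ih (m+1) (PySem.Dict.insert last ch (m : Int)) lf' hrest' (by omega) hlast' hleft'

lemma pvPredA_eq_good (cs : List Char) (L : Int) (hL : 1 ≤ L) (k : Nat)
    (hk : k + L.toNat ≤ cs.length) :
    pvPredA cs L ((k : Nat) : Int) = pvGood cs L.toNat (k + L.toNat - 1) := by
  have hLn : ((L.toNat : Nat) : Int) = L := Int.toNat_of_nonneg (by omega)
  have hLn1 : 1 ≤ L.toNat := by omega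
  rw [pvPredA, pvGood, decide_eq_decide]
  have hslice : PySem.List.slice cs (some ((k : Nat) : Int)) (some (((k : Nat) : Int) + L)) =
      (cs.drop k).take L.toNat := by
    rw [← hLn, ← Nat.cast_add, PySem.List.slice_natCast]
    congr 1
    omega
  rw [hslice, pvSetLen]
  set w := (cs.drop k).take L.toNat with hw
  have hwlen : w.length = L.toNat := by
    simp [hw, List.length_take, List.length_drop]
    omega
  have hidx : k + L.toNat - 1 + 1 = k + L.toNat := by omega
  have hdt : (cs.take (k + L.toNat)).drop (k + L.toNat - L.toNat) = w := by
    rw [List.drop_take, show k + L.toNat - L.toNat = k by omega,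
      show k + L.toNat - k = L.toNat by omega]
  rw [hidx, hdt]
  constructor
  · intro h
    refine ⟨by omega, ?_⟩
    rw [← pvSetLenEq w, hwlen]
    omega
  · rintro ⟨_, h2⟩
    rw [show (PySem.Set.ofList w : List Char).length = w.length from (pvSetLenEq w).mpr h2, hwlen, hLn]

lemma pvALoop_eq_find (cs : List Char) (L : Int) (idxs : List Int) :
    pvALoop cs L idxs =
      (match idxs.find? (pvPredA cs L) with | some i => i + L | none => -1) := by
  induction idxs with
  | nil => rfl
  | cons i rest ih =>
    show (if PySem.Set.len (PySem.Set.ofList (PySem.List.slice cs (some i) (some (i + L)))) = L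
          then i + L else pvALoop cs L rest) = _
    by_cases h : PySem.Set.len (PySem.Set.ofList (PySem.List.slice cs (some i) (some (i + L)))) = L
    · rw [if_pos h, List.find?_cons_of_pos (by simpa [pvPredA] using h)]
    · rw [if_neg h, List.find?_cons_of_neg (by simpa [pvPredA] using h), ih]

lemma pvA_eq (cs : List Char) (L : Int) (hL : 1 ≤ L) :
    pvALoop cs L (PySem.List.pyRange 0 ((cs.length : Int) - L + 1) 1) =
      (match (List.range' 0 cs.length).find? (pvGood cs L.toNat) with
       | some j => (j : Int) + 1 | none => -1) := by
  set n := cs.length with hn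
  have hLn : ((L.toNat : Nat) : Int) = L := Int.toNat_of_nonneg (by omega)
  have hLn1 : 1 ≤ L.toNat := by omega
  set Ln := L.toNat with hLndef
  rw [pvALoop_eq_find]
  by_cases hsmall : n < Ln
  · rw [PySem.List.pyRange_one_eq_nil (by omega)]
    have hrhs : (List.range' 0 n).find? (pvGood cs Ln) = none := by
      rw [List.find?_eq_none]
      intro j hj
      rw [List.mem_range'] at hj
      obtain ⟨i, hi, rfl⟩ := hj
      simp only [pvGood, decide_eq_true_eq, not_and]
      intro h
      omega
    rw [hrhs]
    rfl
  · have hM : ((n : Int) - L + 1) = ((n - Ln + 1 : Nat) : Int) := by push_cast [← hLn]; omega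
    rw [hM, PySem.List.pyRange_zero_natCast, List.find?_map]
    rw [pvFindCongr _ ((pvGood cs Ln) ∘ (fun k => k + Ln - 1)) _ ?ptwise]
    case ptwise =>
      intro k hk
      rw [List.mem_range] at hk
      exact pvPredA_eq_good cs L hL k (by omega)
    -- now rework the RHS
    have hsplit : List.range' 0 n = List.range' 0 (Ln - 1) ++ List.range' (Ln - 1) (n - Ln + 1) := by
      rw [show List.range' (Ln - 1) (n - Ln + 1) = List.range' (0 + 1 * (Ln - 1)) (n - Ln + 1) by congr 1; omega]
      rw [List.range'_append]
      congr 1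
      omega
    rw [hsplit, List.find?_append]
    rw [show (List.range' 0 (Ln - 1)).find? (pvGood cs Ln) = none from List.find?_eq_none.mpr ?side2]
    case side2 =>
      intro j hj
      rw [List.mem_range'] at hj
      obtain ⟨i, hi, rfl⟩ := hj
      simp only [pvGood, decide_eq_true_eq, not_and]
      intro h
      omega
    rw [Option.none_or]
    rw [List.range'_eq_map_range, List.find?_map]
    rw [pvFindCongr ((pvGood cs Ln) ∘ (fun x => Ln - 1 + x)) ((pvGood cs Ln) ∘ (fun k => k + Ln - 1)) _ ?ptwise2]
    case ptwise2 =>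
      intro k _
      simp only [Function.comp_apply]
      congr 1
      omega
    cases hfind : (List.range (n - Ln + 1)).find? ((pvGood cs Ln) ∘ (fun k => k + Ln - 1)) with
    | none => rfl
    | some k =>
      have hk : k < n - Ln + 1 := by
        have := List.mem_of_find?_eq_some hfind
        simpa [List.mem_range] using this
      simp only [Option.map_some]
      show (k : Int) + L = ((Ln - 1 + k : Nat) : Int) + 1
      push_cast [← hLn]
      omega

-- ===== VERDICT (by name: the statement is the Claim_ definition above) =====
theorem find_n_chars_until_unique_line_spec : Claim_equal_find_n_chars_until_unique_line := by
  unfold Claim_equal_find_n_chars_until_unique_line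
  intro buf L _
  unfold Spec_find_n_chars_until_unique_line find_n_chars_until_unique_line
    find_n_chars_until_unique_line_alt
  set cs := buf.toList with hcs
  rw [PySem.Str.len_eq]
  show pvALoop cs L (PySem.List.pyRange 0 ((cs.length : Int) - L + 1) 1) =
    (if L < 0 then -1 else if L = 0 then 0
     else pvBLoop L (PySem.List.enumerate cs 0) PySem.Dict.empty 0)
  rcases lt_trichotomy L 0 with hL | hL | hL
  · -- line_len < 0 : no window ever has negative set size, A scans to -1; B returns -1 directly
    rw [if_pos hL, pvALoop_eq_find]
    rw [List.find?_eq_none.mpr ?never]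
    case never =>
      intro i _
      simp only [pvPredA, decide_eq_true_eq, pvSetLen]
      intro h
      have : (0 : Int) ≤ ((PySem.Set.ofList (PySem.List.slice cs (some i) (some (i + L))) :
          List Char).length : Int) := by positivity
      omega
  · -- line_len = 0 : the empty window at i = 0 matches immediately
    subst hL
    rw [if_neg (by omega), if_pos rfl]
    rw [show ((cs.length : Int) - 0 + 1) = ((cs.length + 1 : Nat) : Int) by push_cast; ring]
    rw [PySem.List.pyRange_one_cons (by omega)]
    have hsl : PySem.List.slice cs (some (0 : Int)) (some ((0 : Int) + 0)) = ([] : List Char) := by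
      rw [show ((0 : Int) + 0) = ((0 : Nat) : Int) by norm_num,
        show ((0 : Int)) = ((0 : Nat) : Int) from rfl, PySem.List.slice_natCast]
      simp
    show (if PySem.Set.len (PySem.Set.ofList (PySem.List.slice cs (some 0) (some (0 + 0)))) = 0
          then (0 : Int) + 0
          else pvALoop cs 0 (PySem.List.pyRange (0 + 1) ((cs.length + 1 : Nat) : Int) 1)) = 0
    rw [hsl, if_pos (by decide)]
    norm_num
  · -- line_len ≥ 1 : both sides equal the first good window, via pvA_eq and pvBLoop_spec
    rw [if_neg (by omega), if_neg (by omega)]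
    rw [pvA_eq cs L hL]
    rw [show (0 : Int) = ((0 : Nat) : Int) from rfl]
    rw [pvBLoop_spec cs L hL cs 0 PySem.Dict.empty 0 (by simp) (by omega) ?lastinit ?leftinit]
    case lastinit =>
      intro c
      refine ⟨fun v hv => ?_, fun _ k hk => by omega⟩
      rw [PySem.Dict.get?_empty] at hv
      cases hv
    case leftinit =>
      exact ⟨Nat.le_refl 0, by simp, fun s hs => by omega⟩
    simp
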